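-- pv_equiv track=rewrite | github.com/flyangovoyang/owenlp | word_segmentation/bert_conversion.py | _generate_position_symbol
-- ===== SOURCE A (Python) =====
-- def _generate_position_symbol(tags):
--     """ add position symbol to tag sequence (name, name, name, O, pos, pos) => (B-name, M-name, ....) """
--     # forward scan
--     mem = ''
--     mark = [0] * len(tags)
--     for i in range(len(tags)):
--         if tags[i] != 'O':
--             if tags[i] == mem:
--                 mark[i] = mark[i - 1] + 1
--             else:
--                 mark[i] = 1
--         mem = tags[i]
--     # backward scan
--     next_mark = 0
--     symbol_res = ['O'] * len(tags)
--     for i in range(len(tags) - 1, -1, -1):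
--         if mark[i] == 1:
--             if next_mark <= 1:
--                 symbol_res[i] = 'S'
--             else:  # 2
--                 symbol_res[i] = 'B'
--         elif mark[i] >= 2:
--             if next_mark > mark[i]:
--                 symbol_res[i] = 'M'
--             else:
--                 symbol_res[i] = 'E'
--         next_mark = mark[i]
--     # merge
--     merge_res = []
--     for symbol, category in zip(symbol_res, tags):
--         if symbol == 'O':
--             merge_res.append('O')
--         else:
--             merge_res.append(symbol + '-' + category)
--     return merge_res
-- ===== SOURCE B (Python) =====
-- def _generate_position_symbol(tags):
--     """ add position symbol to tag sequence (name, name, name, O, pos, pos) => (B-name, M-name, ....) """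
--     out = []
--     i = 0
--     while i < len(tags):
--         tag = tags[i]
--         j = i
--         while j < len(tags) and tags[j] == tag:
--             j += 1
--         n = j - i
--         if tag == 'O':
--             out.extend(['O'] * n)
--         elif n == 1:
--             out.append('S-' + tag)
--         else:
--             out.extend(['B-' + tag] + ['M-' + tag] * (n - 2) + ['E-' + tag])
--         i = j
--     return out
-- ===== Notes on version B (the rewrite author's own statement) =====
-- stated objective: simpler
-- what changed: Replaces the three passes (forward mark-array fill, backward lookahead scan over the mark array, and a merge zip) with a single pass over maximal runs of equal tags that emits S / B,M*,E / O labels directly from each run's length.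
import Mathlib
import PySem

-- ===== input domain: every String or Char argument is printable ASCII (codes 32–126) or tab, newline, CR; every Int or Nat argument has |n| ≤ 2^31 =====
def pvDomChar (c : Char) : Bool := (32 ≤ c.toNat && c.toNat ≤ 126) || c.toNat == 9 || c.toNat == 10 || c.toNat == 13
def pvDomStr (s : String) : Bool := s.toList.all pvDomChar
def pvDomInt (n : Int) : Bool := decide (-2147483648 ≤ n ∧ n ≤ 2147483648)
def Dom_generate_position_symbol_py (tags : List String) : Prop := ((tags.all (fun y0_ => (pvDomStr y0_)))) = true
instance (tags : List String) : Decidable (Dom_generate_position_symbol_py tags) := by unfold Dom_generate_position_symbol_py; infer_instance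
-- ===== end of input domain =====

-- B replaces A's three passes (forward mark fill, backward lookahead, merge) by one pass over
-- maximal runs of equal tags emitting the BMES labels directly; same return value, no speed claim.

-- ===== PORT A =====
-- body of the forward scan loop; tags[i] is always in range inside the loop, so pyGetD is exact
def pvFwdBody (tags : List String) (st : String × List Int) (i : Int) : String × List Int :=
  let mem := st.1
  let mark := st.2
  let ti := PySem.List.pyGetD tags i ""
  let mark' :=
    if ti ≠ "O" then
      (if ti = mem then PySem.List.pySetD mark i (PySem.List.pyGetD mark (i - 1) 0 + 1)
       else PySem.List.pySetD mark i 1)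
    else mark
  (ti, mark')

-- body of the backward scan loop
def pvBwdBody (mark : List Int) (st : Int × List String) (i : Int) : Int × List String :=
  let next_mark := st.1
  let symbol_res := st.2
  let mi := PySem.List.pyGetD mark i 0
  let symbol_res' :=
    if mi = 1 then
      (if next_mark ≤ 1 then PySem.List.pySetD symbol_res i "S"
       else PySem.List.pySetD symbol_res i "B")
    else if 2 ≤ mi then
      (if mi < next_mark then PySem.List.pySetD symbol_res i "M"
       else PySem.List.pySetD symbol_res i "E")
    else symbol_res
  (mi, symbol_res')

def generate_position_symbol_py (tags : List String) : List String :=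
  -- forward scan
  let fwd := (PySem.List.pyRange 0 (tags.length : Int) 1).foldl (pvFwdBody tags)
    ("", List.replicate tags.length (0 : Int))
  let mark := fwd.2
  -- backward scan
  let bwd := (PySem.List.pyRange ((tags.length : Int) - 1) (-1) (-1)).foldl (pvBwdBody mark)
    ((0 : Int), List.replicate tags.length "O")
  let symbol_res := bwd.2
  -- merge
  (List.zip symbol_res tags).foldl
    (fun acc sc => if sc.1 = "O" then acc ++ ["O"] else acc ++ [sc.1 ++ "-" ++ sc.2]) []

-- ===== PORT B =====
def pvEmitRun (tag : String) (n : Nat) : List String :=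
  if tag = "O" then List.replicate n "O"
  else if n = 1 then ["S-" ++ tag]
  else ("B-" ++ tag) :: (List.replicate (n - 2) ("M-" ++ tag) ++ ["E-" ++ tag])

def generate_position_symbol_py_alt : List String → List String
  | [] => []
  | t :: ts =>
    pvEmitRun t ((ts.takeWhile (· == t)).length + 1) ++
      generate_position_symbol_py_alt (ts.dropWhile (· == t))
termination_by l => l.length
decreasing_by
  have h := List.length_dropWhile_le (· == t) ts
  simp
  omega

-- ===== PRECONDITION & SPEC =====
def Spec_generate_position_symbol_py (tags : List String) (out : List String) : Prop := out = generate_position_symbol_py_alt tags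
instance (tags : List String) (out : List String) : Decidable (Spec_generate_position_symbol_py tags out) := by unfold Spec_generate_position_symbol_py; infer_instance

-- ===== CLAIM (what is proved, stated in full; the proofs are below) =====
def Claim_equal_generate_position_symbol_py : Prop := ∀ (tags : List String), Dom_generate_position_symbol_py tags → Spec_generate_position_symbol_py tags (generate_position_symbol_py tags)

-- ===== LEMMAS AND PROOFS =====

-- the mark value A's forward scan writes at a position with tag t, given the previous
-- tag mem and the previous mark value prev
def mval (mem : String) (prev : Int) (t : String) : Int :=
  if t ≠ "O" then (if t = mem then prev + 1 else 1) else 0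

-- the whole mark array as a scan
def markSpec (mem : String) (prev : Int) : List String → List Int
  | [] => []
  | t :: ts => mval mem prev t :: markSpec t (mval mem prev t) ts

-- the symbol A's backward scan writes for mark value m with next mark value nm
def symF (m nm : Int) : String :=
  if m = 1 then (if nm ≤ 1 then "S" else "B")
  else if 2 ≤ m then (if m < nm then "M" else "E")
  else "O"

def symSpec : List Int → List String
  | [] => []
  | m :: ms => symF m (ms.headD 0) :: symSpec ms

def gMerge (s c : String) : String := if s = "O" then "O" else s ++ "-" ++ c

-- the three passes of A fused into one local recursion
def comb : String → Int → List String → List String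
  | _, _, [] => []
  | mem, prev, t :: ts =>
    let m := mval mem prev t
    let nm := match ts.head? with
      | none => 0
      | some t' => mval t m t'
    gMerge (symF m nm) t :: comb t m ts

lemma length_markSpec (mem : String) (prev : Int) (l : List String) :
    (markSpec mem prev l).length = l.length := by
  induction l generalizing mem prev with
  | nil => rfl
  | cons t ts ih => simp [markSpec, ih]

lemma getD_append_length {α : Type} [Inhabited α] (xs : List α) (y : α) (ys : List α) (d : α) :
    (xs ++ y :: ys).getD xs.length d = y := by
  induction xs with
  | nil => rfl
  | cons x xs ih => simpa using ih

lemma set_append_length {α : Type} (xs : List α) (y : α) (ys : List α) (v : α) :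
    (xs ++ y :: ys).set xs.length v = xs ++ v :: ys := by
  induction xs with
  | nil => rfl
  | cons x xs ih => simpa using ih

-- ----- forward scan -----
lemma getD_last_cons {α : Type} (x : α) (l : List α) (d : α) :
    (x :: l).getD ((x :: l).length - 1) d = (x :: l).getLastD d := by
  induction l generalizing x with
  | nil => rfl
  | cons y l ih =>
    rw [show (x :: y :: l).length - 1 = ((y :: l).length - 1) + 1 by simp]
    rw [List.getD_cons_succ, ih y]
    cases l <;> simp [List.getLastD]

lemma fwd_loop (tags : List String) :
    ∀ (rest tdone : List String) (done : List Int) (mem : String),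
      tags = tdone ++ rest → tdone.length = done.length →
      ((PySem.List.pyRange (done.length : Int) ((done.length : Int) + rest.length) 1).foldl
          (pvFwdBody tags) (mem, done ++ List.replicate rest.length 0)).2
        = done ++ markSpec mem (done.getLastD 0) rest := by
  intro rest
  induction rest with
  | nil =>
    intro tdone done mem htags hlen
    rw [show ((done.length : Int) + ((([] : List String)).length : Nat)) = (done.length : Int) by simp]
    rw [PySem.List.pyRange_one_eq_nil le_rfl]
    simp [markSpec]
  | cons t ts ih =>
    intro tdone done mem htags hlen
    have hlt : (done.length : Int) < (done.length : Int) + ((t :: ts).length : Nat) := by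
      have h : ((t :: ts).length : Int) = (ts.length : Int) + 1 := by
        simp
      omega
    rw [PySem.List.pyRange_one_cons hlt, List.foldl_cons]
    have hti : PySem.List.pyGetD tags ((done.length : Int)) "" = t := by
      rw [htags, PySem.List.pyGetD_natCast, ← hlen]
      exact getD_append_length _ _ _ _
    have hprev : PySem.List.pyGetD (done ++ List.replicate (t :: ts).length (0 : Int))
        ((done.length : Int) - 1) 0 = done.getLastD 0 := by
      cases done with
      | nil =>
        rw [show ((([] : List Int)).length : Int) - 1 = -1 by simp]
        rw [PySem.List.pyGetD_neg_one _ _ (by simp)]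
        simp [List.getLast_replicate]
      | cons d ds =>
        have e : ((d :: ds).length : Int) - 1 = (((d :: ds).length - 1 : Nat) : Int) := by
          simp only [List.length_cons]; push_cast; omega
        rw [e, PySem.List.pyGetD_natCast, List.getD_append _ _ _ _ (by simp)]
        exact getD_last_cons d ds 0
    have hset : ∀ v : Int,
        PySem.List.pySetD (done ++ List.replicate (t :: ts).length (0 : Int))
          ((done.length : Int)) v = (done ++ [v]) ++ List.replicate ts.length 0 := by
      intro v
      rw [PySem.List.pySetD_natCast,
        show List.replicate (t :: ts).length (0 : Int) = 0 :: List.replicate ts.length 0 by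
          simp [List.replicate_succ],
        set_append_length, List.append_assoc, List.singleton_append]
    have hbody : pvFwdBody tags (mem, done ++ List.replicate (t :: ts).length 0)
          ((done.length : Int))
        = (t, (done ++ [mval mem (done.getLastD 0) t]) ++ List.replicate ts.length 0) := by
      simp only [pvFwdBody, hti, hprev, hset]
      by_cases h1 : t = "O"
      · simp [h1, mval, List.replicate_succ, List.append_assoc]
      · by_cases h2 : t = mem
        · subst h2
          simp [h1, mval]
        · simp [h1, h2, mval]
    rw [hbody]
    have hIH := ih (tdone ++ [t]) (done ++ [mval mem (done.getLastD 0) t]) t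
      (by rw [htags, List.append_assoc]; rfl) (by simp [hlen])
    rw [List.getLastD_concat] at hIH
    have es : ((done ++ [mval mem (done.getLastD 0) t]).length : Int) = (done.length : Int) + 1 := by
      simp
    rw [es] at hIH
    have er : (done.length : Int) + ((t :: ts).length : Nat)
        = (done.length : Int) + 1 + (ts.length : Nat) := by
      simp only [List.length_cons]; push_cast; ring
    rw [er, hIH, markSpec]
    simp [List.append_assoc]

lemma fwd_corr (tags : List String) :
    ((PySem.List.pyRange 0 (tags.length : Int) 1).foldl (pvFwdBody tags)
        ("", List.replicate tags.length (0 : Int))).2 = markSpec "" 0 tags := by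
  have h := fwd_loop tags tags [] [] "" (by simp) (by simp)
  simpa using h

-- ----- backward scan -----
lemma bwd_loop (mark : List Int) :
    ∀ (pre suf : List Int), mark = pre ++ suf →
      ((PySem.List.pyRange ((pre.length : Int) - 1) (-1) (-1)).foldl (pvBwdBody mark)
          (suf.headD 0, List.replicate pre.length "O" ++ symSpec suf)).2
        = symSpec (pre ++ suf) := by
  intro pre
  induction pre using List.reverseRecOn with
  | nil =>
    intro suf h
    rw [show ((([] : List Int)).length : Int) - 1 = -1 by simp]
    rw [PySem.List.pyRange_neg_one_eq_nil le_rfl]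
    simp
  | append_singleton pre m ih =>
    intro suf h
    have hlen : (((pre ++ [m]).length : Int) - 1) = (pre.length : Int) := by
      simp
    rw [hlen, PySem.List.pyRange_neg_one_cons (by omega), List.foldl_cons]
    have hmark : mark = pre ++ m :: suf := by
      rw [h, List.append_assoc]; rfl
    have hmi : PySem.List.pyGetD mark ((pre.length : Int)) 0 = m := by
      rw [hmark, PySem.List.pyGetD_natCast]
      exact getD_append_length _ _ _ _
    have hset : ∀ v : String,
        PySem.List.pySetD (List.replicate (pre ++ [m]).length "O" ++ symSpec suf)
          ((pre.length : Int)) v = List.replicate pre.length "O" ++ v :: symSpec suf := by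
      intro v
      rw [PySem.List.pySetD_natCast,
        show (pre ++ [m]).length = pre.length + 1 by simp,
        List.replicate_succ', List.append_assoc, List.singleton_append]
      have hsa := set_append_length (List.replicate pre.length "O") "O" (symSpec suf) v
      simpa using hsa
    have hbody : pvBwdBody mark (suf.headD 0, List.replicate (pre ++ [m]).length "O" ++ symSpec suf)
          ((pre.length : Int))
        = ((m :: suf).headD 0, List.replicate pre.length "O" ++ symSpec (m :: suf)) := by
      simp only [pvBwdBody, hmi, hset, List.headD_cons]
      by_cases h1 : m = 1
      · by_cases h2 : suf.head?.getD 0 ≤ 1 <;>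
          simp [h1, h2, symSpec, symF, List.headD_eq_head?_getD]
      · by_cases h3 : 2 ≤ m
        · by_cases h4 : m < suf.head?.getD 0 <;>
            simp [h1, h3, h4, symSpec, symF, List.headD_eq_head?_getD]
        · simp [h1, h3, symSpec, symF,
            show (pre ++ [m]).length = pre.length + 1 by simp,
            List.replicate_succ', List.append_assoc]
    rw [hbody]
    have := ih (m :: suf) hmark
    simpa [List.append_assoc] using this

lemma bwd_corr (tags : List String) (mark : List Int) (h : mark.length = tags.length) :
    ((PySem.List.pyRange ((tags.length : Int) - 1) (-1) (-1)).foldl (pvBwdBody mark)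
        ((0 : Int), List.replicate tags.length "O")).2 = symSpec mark := by
  have hb := bwd_loop mark mark [] (by simp)
  rw [h] at hb
  simpa [symSpec] using hb

-- ----- merge -----
lemma map_zip_eq_zipWith {α β γ : Type} (g : α → β → γ) :
    ∀ (xs : List α) (ys : List β),
      (List.zip xs ys).map (fun p => g p.1 p.2) = List.zipWith g xs ys := by
  intro xs
  induction xs with
  | nil => intro ys; rfl
  | cons x xs ih => intro ys; cases ys with
    | nil => rfl
    | cons y ys => simp [ih]

lemma merge_corr (sym tags : List String) :
    (List.zip sym tags).foldl
        (fun acc sc => if sc.1 = "O" then acc ++ ["O"] else acc ++ [sc.1 ++ "-" ++ sc.2]) []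
      = List.zipWith gMerge sym tags := by
  have hf : (fun (acc : List String) (sc : String × String) =>
      if sc.1 = "O" then acc ++ ["O"] else acc ++ [sc.1 ++ "-" ++ sc.2])
      = fun acc sc => acc ++ [gMerge sc.1 sc.2] := by
    funext acc sc
    by_cases h : sc.1 = "O" <;> simp [gMerge, h]
  rw [hf, PySem.List.foldl_append_singleton_eq_map]
  simp only [List.nil_append]
  exact map_zip_eq_zipWith _ _ _

-- A as the fused local recursion
lemma zip_sym_eq_comb :
    ∀ (l : List String) (mem : String) (prev : Int),
      List.zipWith gMerge (symSpec (markSpec mem prev l)) l = comb mem prev l := by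
  intro l
  induction l with
  | nil => intro mem prev; rfl
  | cons t ts ih =>
    intro mem prev
    have hnm : (markSpec t (mval mem prev t) ts).headD 0
        = (match ts.head? with | none => 0 | some t' => mval t (mval mem prev t) t') := by
      cases ts <;> simp [markSpec]
    simp only [markSpec, symSpec, List.zipWith, comb, hnm]
    rw [ih]

-- ----- run lemmas relating comb to B -----
lemma takeWhile_eq_rep (t : String) (l : List String) :
    l.takeWhile (· == t) = List.replicate (l.takeWhile (· == t)).length t := by
  apply List.eq_replicate_of_mem
  intro b hb
  have := List.mem_takeWhile_imp hb
  simpa using this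

lemma comb_O_run : ∀ (k : Nat) (rest : List String),
    comb "O" 0 (List.replicate k "O" ++ rest) = List.replicate k "O" ++ comb "O" 0 rest := by
  intro k
  induction k with
  | zero => intro rest; simp
  | succ k ih =>
    intro rest
    simp only [List.replicate_succ, List.cons_append, comb]
    simp [mval, symF, gMerge, ih]

lemma str_dash (a b : String) (h : a ++ "-" = b) (c : String) : a ++ "-" ++ c = b ++ c := by
  rw [← h, String.append_assoc]

lemma comb_run (t : String) (ht : t ≠ "O") :
    ∀ (j : Nat) (k : Int) (rest : List String), 1 ≤ k → rest.head? ≠ some t → 1 ≤ j →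
      comb t k (List.replicate j t ++ rest)
        = List.replicate (j - 1) ("M-" ++ t) ++ ("E-" ++ t) :: comb t (k + j) rest := by
  intro j
  induction j with
  | zero => intro k rest hk hr hj; omega
  | succ j ih =>
    intro k rest hk hr hj
    have hmv : mval t k t = k + 1 := by simp [mval, ht]
    rcases Nat.eq_zero_or_pos j with hj0 | hj1
    · -- base case: run remainder of length 1, emits E
      subst hj0
      have hnm : (match rest.head? with | none => (0:Int) | some t' => mval t (k+1) t') ≤ 1 := by
        cases hrest : rest.head? with
        | none => norm_num
        | some t' =>
          have ht' : t' ≠ t := by intro h; rw [h] at hrest; exact hr hrest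
          by_cases h1 : t' = "O"
          · simp [mval, h1]
          · simp [mval, h1, ht']
      simp only [List.replicate_succ, List.replicate_zero, List.cons_append, List.nil_append, comb]
      rw [hmv]
      have hsym : symF (k + 1) (match rest.head? with | none => (0:Int) | some t' => mval t (k+1) t') = "E" := by
        unfold symF
        rw [if_neg (by omega), if_pos (by omega), if_neg (by omega)]
      rw [hsym]
      have hE : gMerge "E" t = "E-" ++ t := by
        unfold gMerge
        rw [if_neg (by decide)]
        exact str_dash _ _ rfl _
      rw [hE]
      norm_num
    · -- inductive case: emits M, recurse
      have hrep : List.replicate (j+1) t ++ rest = t :: (List.replicate j t ++ rest) := by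
        simp [List.replicate_succ]
      rw [hrep]
      simp only [comb]
      rw [hmv]
      have hhead : (List.replicate j t ++ rest).head? = some t := by
        cases j with
        | zero => omega
        | succ j => simp [List.replicate_succ]
      rw [hhead]
      have hmv2 : mval t (k+1) t = k + 2 := by simp [mval, ht]; ring
      have hsym : symF (k + 1) (mval t (k+1) t) = "M" := by
        rw [hmv2]; unfold symF
        rw [if_neg (by omega), if_pos (by omega), if_pos (by omega)]
      rw [hsym]
      have hM : gMerge "M" t = "M-" ++ t := by
        unfold gMerge
        rw [if_neg (by decide)]
        exact str_dash _ _ rfl _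
      rw [hM]
      rw [ih (k+1) rest (by omega) hr (by omega)]
      have hrepM : List.replicate (j + 1 - 1) ("M-" ++ t) = ("M-" ++ t) :: List.replicate (j - 1) ("M-" ++ t) := by
        have : j + 1 - 1 = (j - 1) + 1 := by omega
        rw [this, List.replicate_succ]
      rw [hrepM]
      have hk2 : k + 1 + (j : Int) = k + ((j : Nat) + 1 : Nat) := by push_cast; ring
      rw [hk2]
      simp

lemma head_dropWhile_ne (t : String) : ∀ (l : List String) (x : String),
    (l.dropWhile (· == t)).head? = some x → x ≠ t := by
  intro l
  induction l with
  | nil => intro x h; simp at h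
  | cons a l ih =>
    intro x h
    rw [List.dropWhile_cons] at h
    by_cases ha : (a == t) = true
    · rw [if_pos ha] at h; exact ih x h
    · rw [if_neg ha] at h
      simp only [List.head?_cons, Option.some.injEq] at h
      subst h
      simpa using ha

lemma comb_eq_alt : ∀ (N : Nat) (l : List String) (mem : String) (prev : Int),
    l.length ≤ N → (l.head? = some mem → prev = 0) →
    comb mem prev l = generate_position_symbol_py_alt l := by
  intro N
  induction N with
  | zero =>
    intro l mem prev hl _
    have hnil : l = [] := List.length_eq_zero_iff.mp (Nat.le_zero.mp hl)
    subst hnil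
    simp [comb, generate_position_symbol_py_alt]
  | succ N ih =>
    intro l mem prev hl hH
    cases l with
    | nil => simp [comb, generate_position_symbol_py_alt]
    | cons t ts =>
      rw [generate_position_symbol_py_alt]
      set r := (ts.takeWhile (· == t)).length with hr
      set rest := ts.dropWhile (· == t) with hrestdef
      have hts : List.replicate r t ++ rest = ts := by
        rw [hr, hrestdef, ← takeWhile_eq_rep]; exact List.takeWhile_append_dropWhile
      have hrlen : rest.length ≤ N := by
        have h1 := List.length_dropWhile_le (· == t) ts
        simp only [List.length_cons] at hl
        rw [hrestdef]
        omega
      have hrhead : rest.head? ≠ some t := by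
        intro h; exact head_dropWhile_ne t ts t (by rw [← hrestdef]; exact h) rfl
      by_cases htO : t = "O"
      · subst htO
        simp only [comb]
        have hm : mval mem prev "O" = 0 := by simp [mval]
        rw [hm, ← hts, comb_O_run, ih rest "O" 0 hrlen (fun _ => rfl)]
        simp [symF, gMerge, pvEmitRun, List.replicate_succ]
      · have hm : mval mem prev t = 1 := by
          by_cases hmem : t = mem
          · have hp : prev = 0 := hH (by simp [hmem])
            subst hmem
            simp [mval, htO, hp]
          · simp [mval, htO, hmem]
        rcases Nat.eq_zero_or_pos r with hr0 | hr1
        · -- singleton run: S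
          have htsh : ts.head? ≠ some t := by
            intro h
            cases ts with
            | nil => simp at h
            | cons a ts' =>
              simp only [List.head?_cons, Option.some.injEq] at h
              subst h
              rw [hr] at hr0
              simp [List.takeWhile_cons_of_pos] at hr0
          have hrest_ts : rest = ts := by
            rw [hrestdef]
            cases ts with
            | nil => rfl
            | cons a ts' =>
              have ha : ¬ ((a == t) = true) := by
                intro hab
                exact htsh (by simp at hab; simp [hab])
              rw [List.dropWhile_cons, if_neg ha]
          simp only [comb]
          rw [hm]
          have hnm : (match ts.head? with | none => (0:Int) | some t' => mval t 1 t') ≤ 1 := by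
            cases hh : ts.head? with
            | none => norm_num
            | some t' =>
              have ht' : t' ≠ t := by
                intro h; rw [h] at hh; exact htsh hh
              by_cases h1 : t' = "O"
              · simp [mval, h1]
              · simp [mval, h1, ht']
          have hsym : symF 1 (match ts.head? with | none => (0:Int) | some t' => mval t 1 t') = "S" := by
            unfold symF
            rw [if_pos rfl, if_pos hnm]
          rw [hsym]
          have hS : gMerge "S" t = "S-" ++ t := by
            unfold gMerge
            rw [if_neg (by decide)]
            exact str_dash _ _ rfl _
          rw [hS, ih ts t 1 (by simp only [List.length_cons] at hl; omega) (fun h => absurd h htsh)]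
          rw [hr0]
          simp [pvEmitRun, htO, hrest_ts]
        · -- run of length r+1 ≥ 2: B, M…, E
          simp only [comb]
          rw [hm]
          have hh : ts.head? = some t := by
            obtain ⟨r', hr'⟩ : ∃ r', r = r' + 1 := ⟨r - 1, by omega⟩
            rw [← hts, hr', List.replicate_succ]
            simp
          have hnm2 : (match ts.head? with | none => (0:Int) | some t' => mval t 1 t') = 2 := by
            rw [hh]
            simp [mval, htO]
          rw [hnm2]
          have hsym : symF 1 2 = "B" := by unfold symF; norm_num
          rw [hsym]
          have hB : gMerge "B" t = "B-" ++ t := by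
            unfold gMerge
            rw [if_neg (by decide)]
            exact str_dash _ _ rfl _
          rw [hB, ← hts, comb_run t htO r 1 rest le_rfl hrhead hr1]
          rw [ih rest t (1 + r) hrlen (fun h => absurd h hrhead)]
          unfold pvEmitRun
          rw [if_neg htO, if_neg (by omega)]
          have h2 : r + 1 - 2 = r - 1 := by omega
          simp [h2]

-- ===== VERDICT (by name: the statement is the Claim_ definition above) =====
theorem generate_position_symbol_py_spec : Claim_equal_generate_position_symbol_py := by
  intro tags _
  unfold Spec_generate_position_symbol_py
  show generate_position_symbol_py tags = generate_position_symbol_py_alt tags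
  unfold generate_position_symbol_py
  dsimp only
  rw [fwd_corr, bwd_corr tags _ (length_markSpec _ _ _), merge_corr, zip_sym_eq_comb]
  exact comb_eq_alt tags.length tags "" 0 le_rfl (fun _ => rfl)
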